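-- pv_equiv track=rewrite | github.com/rsbowman-striveworks/advent_of_code_2023 | day03/day03.py | discharge_numbers
-- ===== SOURCE A (Python) =====
-- def discharge_numbers(numbers, parts):
--     """
--     `numbers` and `parts` both sorted
--     """
--     discharged, remaining = [], []
--     i_part, i_number = 0, 0
--     n_numbers = len(numbers)
--
--     while i_part < len(parts):
--         while i_number < n_numbers and numbers[i_number][2] < parts[i_part]: # end of number < part
--             remaining.append(numbers[i_number])
--             i_number += 1
--         if i_number >= n_numbers:
--             break
--         elif numbers[i_number][1] - 1 <= parts[i_part]:
--             discharged.append(numbers[i_number][0])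
--             i_number += 1
--         else:
--             i_part += 1
--
--     while i_number < n_numbers:
--         remaining.append(numbers[i_number])
--         i_number += 1
--
--     return discharged, remaining
-- ===== SOURCE B (Python) =====
-- def _span(rest, p):
--     # longest prefix of rest whose numbers are processable against part p
--     for k, n in enumerate(rest):
--         if not (n[2] < p or n[1] - 1 <= p):
--             return rest[:k], rest[k:]
--     return rest, []
--
--
-- def discharge_numbers(numbers, parts):
--     """
--     `numbers` and `parts` both sorted
--     """
--     discharged, remaining, rest = [], [], numbers
--     for p in parts:
--         taken, rest = _span(rest, p)
--         discharged += [n[0] for n in taken if not n[2] < p]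
--         remaining += [n for n in taken if n[2] < p]
--     return discharged, remaining + rest
-- ===== Notes on version B (the rewrite author's own statement) =====
-- stated objective: alternative
-- what changed: Replaced the interleaved two-pointer state machine (three-way branch per element over two shared mutable indices) by a fold over parts that, for each part, splits off the maximal processable prefix of the remaining numbers with a span and partitions it into discharged/remaining by comprehensions; equivalent on all inputs, no precondition.
import Mathlib
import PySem

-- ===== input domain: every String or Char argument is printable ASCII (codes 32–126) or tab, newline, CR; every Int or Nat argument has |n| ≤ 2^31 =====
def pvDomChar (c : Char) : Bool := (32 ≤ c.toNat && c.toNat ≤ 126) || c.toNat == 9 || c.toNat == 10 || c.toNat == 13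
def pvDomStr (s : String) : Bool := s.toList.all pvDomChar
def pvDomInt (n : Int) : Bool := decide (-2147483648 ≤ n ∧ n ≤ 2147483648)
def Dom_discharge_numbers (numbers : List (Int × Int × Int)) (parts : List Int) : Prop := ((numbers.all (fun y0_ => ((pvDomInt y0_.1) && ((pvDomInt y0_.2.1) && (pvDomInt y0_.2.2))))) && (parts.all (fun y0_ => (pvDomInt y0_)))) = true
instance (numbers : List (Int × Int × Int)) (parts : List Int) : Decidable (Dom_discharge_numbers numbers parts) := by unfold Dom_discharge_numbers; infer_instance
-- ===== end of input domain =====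

-- B replaces A's interleaved two-pointer state machine by a fold over parts that splits off,
-- per part, the maximal processable prefix of the remaining numbers (objective: alternative).

-- ===== PORT A =====
-- the two nested while loops and the trailing while, merged into one tail recursion over
-- the two indices (each step is exactly one Python loop iteration, checks in source order)
def dnLoop (numbers : List (Int × Int × Int)) (parts : List Int) (ip iN : Nat)
    (disch : List Int) (rem : List (Int × Int × Int)) : List Int × (List (Int × Int × Int)) :=
  if _ : ip < parts.length then
    if _ : iN < numbers.length then
      let n := numbers.getD iN (0, 0, 0)   -- in range: guarded by iN < len
      if n.2.2 < parts.getD ip 0 then      -- inner while body: end of number < part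
        dnLoop numbers parts ip (iN + 1) disch (rem ++ [n])
      else if n.2.1 - 1 ≤ parts.getD ip 0 then
        dnLoop numbers parts ip (iN + 1) (disch ++ [n.1]) rem
      else
        dnLoop numbers parts (ip + 1) iN disch rem
    else (disch, rem)                      -- break; tail while appends nothing (iN ≥ len)
  else (disch, rem ++ numbers.drop iN)     -- tail while: flush remaining numbers
termination_by (parts.length - ip) + (numbers.length - iN)
decreasing_by all_goals omega

def discharge_numbers (numbers : List (Int × Int × Int)) (parts : List Int) : List Int × (List (Int × Int × Int)) :=
  dnLoop numbers parts 0 0 [] []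

-- ===== PORT B =====
-- Source B's _span: longest prefix of rest processable against part p, plus the rest
def bSpan (p : Int) (rest : List (Int × Int × Int)) : List (Int × Int × Int) × List (Int × Int × Int) :=
  match rest with
  | [] => ([], [])
  | n :: t =>
    if decide (n.2.2 < p) || decide (n.2.1 - 1 ≤ p) then
      let (a, b) := bSpan p t
      (n :: a, b)
    else ([], n :: t)

-- Source B's for-loop over parts (discharged, remaining, rest as accumulators; final flush)
def dnAltLoop (ps : List Int) (d : List Int) (r rest : List (Int × Int × Int)) : List Int × (List (Int × Int × Int)) :=
  match ps with
  | [] => (d, r ++ rest)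
  | p :: ps' =>
    let (taken, rest') := bSpan p rest
    dnAltLoop ps' (d ++ (taken.filter (fun n => !decide (n.2.2 < p))).map (·.1))
      (r ++ taken.filter (fun n => decide (n.2.2 < p))) rest'

def discharge_numbers_alt (numbers : List (Int × Int × Int)) (parts : List Int) : List Int × (List (Int × Int × Int)) :=
  dnAltLoop parts [] [] numbers

-- ===== PRECONDITION & SPEC =====
def Spec_discharge_numbers (numbers : List (Int × Int × Int)) (parts : List Int) (out : List Int × (List (Int × Int × Int))) : Prop := out = discharge_numbers_alt numbers parts
instance (numbers : List (Int × Int × Int)) (parts : List Int) (out : List Int × (List (Int × Int × Int))) : Decidable (Spec_discharge_numbers numbers parts out) := by unfold Spec_discharge_numbers; infer_instance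

-- ===== CLAIM (what is proved, stated in full; the proofs are below) =====
def Claim_equal_discharge_numbers : Prop := ∀ (numbers : List (Int × Int × Int)) (parts : List Int), Dom_discharge_numbers numbers parts → Spec_discharge_numbers numbers parts (discharge_numbers numbers parts)

-- ===== LEMMAS AND PROOFS =====

-- exhausted numbers: every later part takes nothing
lemma altLoop_nil_rest (ps : List Int) (d : List Int) (r : List (Int × Int × Int)) :
    dnAltLoop ps d r [] = (d, r) := by
  induction ps generalizing d r with
  | nil => simp [dnAltLoop]
  | cons p ps' ih => simp [dnAltLoop, bSpan, ih]

-- a processable head of rest is absorbed into d or r without consuming the part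
lemma altLoop_absorb (p : Int) (ps : List Int) (d : List Int)
    (r : List (Int × Int × Int)) (n : Int × Int × Int) (rest : List (Int × Int × Int))
    (hc : (decide (n.2.2 < p) || decide (n.2.1 - 1 ≤ p)) = true) :
    dnAltLoop (p :: ps) d r (n :: rest) =
      if n.2.2 < p then dnAltLoop (p :: ps) d (r ++ [n]) rest
      else dnAltLoop (p :: ps) (d ++ [n.1]) r rest := by
  rcases h : bSpan p rest with ⟨a, b⟩
  by_cases he : n.2.2 < p
  · simp [dnAltLoop, bSpan, h, he]
  · have hs : n.2.1 - 1 ≤ p := by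
      rcases Bool.or_eq_true_iff.mp hc with h' | h'
      · exact absurd (of_decide_eq_true h') he
      · exact of_decide_eq_true h'
    simp [dnAltLoop, bSpan, h, he, hs]

-- an unprocessable head of rest ends the current part's span
lemma altLoop_skip (p : Int) (ps : List Int) (d : List Int)
    (r rest : List (Int × Int × Int))
    (hc : ∀ n rest', rest = n :: rest' → (decide (n.2.2 < p) || decide (n.2.1 - 1 ≤ p)) = false) :
    dnAltLoop (p :: ps) d r rest = dnAltLoop ps d r rest := by
  cases rest with
  | nil => simp [dnAltLoop, bSpan]
  | cons n rest' =>
    have h' := Bool.or_eq_false_iff.mp (hc n rest' rfl)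
    have hne := of_decide_eq_false h'.1
    have hns := of_decide_eq_false h'.2
    simp [dnAltLoop, bSpan, hne, hns]

-- the synchronization invariant: A's loop at indices (ip, iN) computes what B's fold
-- computes on the still-unprocessed suffixes
lemma loop_eq_altLoop (numbers : List (Int × Int × Int)) (parts : List Int)
    (ip iN : Nat) (disch : List Int) (rem : List (Int × Int × Int)) :
    dnLoop numbers parts ip iN disch rem =
      dnAltLoop (parts.drop ip) disch rem (numbers.drop iN) := by
  rw [dnLoop]
  split
  · rename_i hip
    have hpdrop : parts.drop ip = parts.getD ip 0 :: parts.drop (ip + 1) := by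
      rw [List.getD_eq_getElem _ _ hip]
      exact List.drop_eq_getElem_cons hip
    split
    · rename_i hiN
      dsimp only
      have hndrop : numbers.drop iN = numbers.getD iN (0, 0, 0) :: numbers.drop (iN + 1) := by
        rw [List.getD_eq_getElem _ _ hiN]
        exact List.drop_eq_getElem_cons hiN
      split
      · -- end of number < part: to remaining, number consumed
        rename_i he
        rw [loop_eq_altLoop numbers parts ip (iN + 1) disch (rem ++ [numbers.getD iN (0, 0, 0)]),
          hpdrop, hndrop, altLoop_absorb _ _ _ _ _ _ (by simp only [Bool.or_eq_true, decide_eq_true_eq]; exact Or.inl he), if_pos he]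
      · split
        · -- start - 1 ≤ part: discharged, number consumed
          rename_i he hs1
          rw [loop_eq_altLoop numbers parts ip (iN + 1) (disch ++ [(numbers.getD iN (0, 0, 0)).1]) rem,
            hpdrop, hndrop, altLoop_absorb _ _ _ _ _ _ (by simp only [Bool.or_eq_true, decide_eq_true_eq]; exact Or.inr hs1), if_neg he]
        · -- part < start - 1: part consumed
          rename_i he hs1
          rw [loop_eq_altLoop numbers parts (ip + 1) iN disch rem, hpdrop,
            altLoop_skip _ _ _ _ _ ?_]
          intro n rest' hr
          rw [hndrop] at hr
          cases hr
          simp only [Bool.or_eq_false_iff, decide_eq_false_iff_not]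
          exact ⟨he, hs1⟩
    · -- numbers exhausted: break; B's later parts take nothing
      rename_i hiN
      rw [show List.drop iN numbers = [] from List.drop_eq_nil_of_le (by omega), altLoop_nil_rest]
  · -- parts exhausted: both flush the remaining numbers
    rename_i hip
    rw [show List.drop ip parts = [] from List.drop_eq_nil_of_le (by omega)]
    simp [dnAltLoop]
termination_by (parts.length - ip) + (numbers.length - iN)
decreasing_by all_goals omega

-- ===== VERDICT (by name: the statement is the Claim_ definition above) =====
theorem discharge_numbers_spec : Claim_equal_discharge_numbers := by
  intro numbers parts _
  unfold Spec_discharge_numbers discharge_numbers discharge_numbers_alt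
  rw [loop_eq_altLoop numbers parts 0 0 [] []]
  simp
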